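-- pv_equiv track=rewrite | github.com/smander/binary-algebra | other/modeling.py | sym_subtract_bits
-- ===== SOURCE A (Python) =====
-- def sym_subtract_bits(bit_a, bit_b, borrow_in):
--     """
--     Symbolic subtraction of two bits with borrow (bit-level approach)
--
--     Args:
--         bit_a, bit_b: '0', '1', or '$'
--         borrow_in: '0', '1', or '$'
--
--     Returns:
--         Tuple of (result_bit, borrow_out) - both can be '0', '1', or '$'
--     """
--
--     # Convert to sets of possible values {0,1}
--     def to_set(x):
--         if x == '$':
--             return {0, 1}
--         else:
--             return {int(x)}
--
--     a_set = to_set(bit_a)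
--     b_set = to_set(bit_b)
--     borrow_set = to_set(borrow_in)
--
--     # Enumerate all combinations
--     possible_results = set()
--     possible_borrows = set()
--
--     for a in a_set:
--         for b in b_set:
--             for borrow in borrow_set:
--                 # Subtraction with borrow: a - b - borrow
--                 # If a < b + borrow, we need to borrow from next bit
--                 if a < b + borrow:
--                     res_bit = a + 2 - b - borrow
--                     borrow_out = 1
--                 else:
--                     res_bit = a - b - borrow
--                     borrow_out = 0
--
--                 possible_results.add(res_bit)
--                 possible_borrows.add(borrow_out)
--
--     # Determine result and borrow out
--     if len(possible_results) == 1: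
--         res_bit_str = '1' if (1 in possible_results) else '0'
--     else:
--         res_bit_str = '$'
--
--     if len(possible_borrows) == 1:
--         borrow_out_str = '1' if (1 in possible_borrows) else '0'
--     else:
--         borrow_out_str = '$'
--
--     return (res_bit_str, borrow_out_str)
-- ===== SOURCE B (Python) =====
-- def sym_subtract_bits(bit_a, bit_b, borrow_in):
--     # Closed form: the result bit is 1 exactly when a - b - borrow_in is +1 or -1
--     # ('$' if any input is unknown, since flipping any unknown flips the result);
--     # the borrow is decided by interval bounds on a - b - borrow_in.
--     def bounds(x):
--         if x == '$':
--             return (0, 1)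
--         v = int(x)
--         return (v, v)
--
--     lo_a, hi_a = bounds(bit_a)
--     lo_b, hi_b = bounds(bit_b)
--     lo_c, hi_c = bounds(borrow_in)
--
--     if '$' in (bit_a, bit_b, borrow_in):
--         res = '$'
--     else:
--         res = '1' if lo_a - lo_b - lo_c in (1, -1) else '0'
--
--     if hi_a < lo_b + lo_c:
--         borrow = '1'
--     elif lo_a >= hi_b + hi_c:
--         borrow = '0'
--     else:
--         borrow = '$'
--     return (res, borrow)
-- ===== Notes on version B (the rewrite author's own statement) =====
-- stated objective: simpler
-- what changed: Replaces the triple nested enumeration over sets of possible values by closed forms: the result bit is '$' when any input is '$' and otherwise 1 exactly when a - b - borrow_in is +1 or -1, and the borrow is decided by interval bounds; Pre_ excludes only the inputs where int() raises ValueError in both programs.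
import Mathlib
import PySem

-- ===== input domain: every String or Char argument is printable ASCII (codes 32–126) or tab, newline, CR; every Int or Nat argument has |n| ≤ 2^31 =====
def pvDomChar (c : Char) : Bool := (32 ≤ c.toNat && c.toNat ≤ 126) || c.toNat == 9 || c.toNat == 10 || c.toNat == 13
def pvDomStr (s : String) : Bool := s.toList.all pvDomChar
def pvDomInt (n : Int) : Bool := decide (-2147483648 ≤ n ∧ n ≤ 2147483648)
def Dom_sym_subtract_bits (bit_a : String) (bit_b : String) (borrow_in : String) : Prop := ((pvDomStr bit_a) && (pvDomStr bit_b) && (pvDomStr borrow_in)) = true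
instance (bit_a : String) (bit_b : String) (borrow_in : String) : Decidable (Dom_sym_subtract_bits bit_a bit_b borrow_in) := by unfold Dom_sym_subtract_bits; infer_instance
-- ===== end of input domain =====

-- B replaces A's 8-way enumeration by closed forms (a ±1 test for the result bit,
-- interval bounds for the borrow); objective: simpler.

-- ===== PORT A =====
-- to_set(x): {0,1} for '$', else {int(x)} (none = ValueError from int(x))
def pvToSet (x : String) : Option (PySem.Set Int) :=
  if x = "$" then some (PySem.Set.ofList [0, 1])
  else (PySem.Int.ofStr? x).map (fun v => PySem.Set.ofList [v])

def sym_subtract_bits (bit_a : String) (bit_b : String) (borrow_in : String) : String × String :=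
  match pvToSet bit_a, pvToSet bit_b, pvToSet borrow_in with
  | some a_set, some b_set, some borrow_set =>
    -- enumerate all combinations, collecting possible results/borrows as sets
    let acc :=
      a_set.foldl (fun acc a =>
        b_set.foldl (fun acc b =>
          borrow_set.foldl (fun acc borrow =>
            let rb : Int × Int :=
              if a < b + borrow then (a + 2 - b - borrow, 1)
              else (a - b - borrow, 0)
            (PySem.Set.add acc.1 rb.1, PySem.Set.add acc.2 rb.2)) acc) acc)
        ((PySem.Set.empty : PySem.Set Int), (PySem.Set.empty : PySem.Set Int))
    let possible_results := acc.1
    let possible_borrows := acc.2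
    let res_bit_str :=
      if possible_results.length = 1 then
        (if PySem.Set.contains possible_results 1 then "1" else "0")
      else "$"
    let borrow_out_str :=
      if possible_borrows.length = 1 then
        (if PySem.Set.contains possible_borrows 1 then "1" else "0")
      else "$"
    (res_bit_str, borrow_out_str)
  | _, _, _ => ("", "")  -- unreachable under Pre_ (Python raises ValueError here)

-- ===== PORT B =====
-- bounds(x): (0,1) for '$', else (int(x), int(x)) (none = ValueError from int(x))
def pvBounds (x : String) : Option (Int × Int) :=
  if x = "$" then some (0, 1)
  else (PySem.Int.ofStr? x).map (fun v => (v, v))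

def sym_subtract_bits_alt (bit_a : String) (bit_b : String) (borrow_in : String) : String × String :=
  (((pvBounds bit_a).bind fun pa =>
    ((pvBounds bit_b).bind fun pb =>
      ((pvBounds borrow_in).map fun pc =>
        let res :=
          if bit_a = "$" ∨ bit_b = "$" ∨ borrow_in = "$" then "$"
          else if pa.1 - pb.1 - pc.1 = 1 ∨ pa.1 - pb.1 - pc.1 = -1 then "1" else "0"
        let borrow :=
          if pa.2 < pb.1 + pc.1 then "1"
          else if pa.1 ≥ pb.2 + pc.2 then "0"
          else "$"
        (res, borrow))))).getD ("", "")  -- getD branch unreachable under Pre_ (Python raises ValueError)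

-- ===== PRECONDITION & SPEC =====
-- Pre_ excludes exactly the inputs where int(x) raises ValueError (in A and in B alike):
-- every argument must be '$' or an int-parseable string.
def Pre_sym_subtract_bits (bit_a : String) (bit_b : String) (borrow_in : String) : Prop :=
  (bit_a = "$" ∨ (PySem.Int.ofStr? bit_a).isSome) ∧
  (bit_b = "$" ∨ (PySem.Int.ofStr? bit_b).isSome) ∧
  (borrow_in = "$" ∨ (PySem.Int.ofStr? borrow_in).isSome)
instance (bit_a : String) (bit_b : String) (borrow_in : String) : Decidable (Pre_sym_subtract_bits bit_a bit_b borrow_in) := by unfold Pre_sym_subtract_bits; infer_instance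

def pvWitness_sym_subtract_bits : String × String × String := ("1", "$", "0")

def Spec_sym_subtract_bits (bit_a : String) (bit_b : String) (borrow_in : String) (out : String × String) : Prop := out = sym_subtract_bits_alt bit_a bit_b borrow_in
instance (bit_a : String) (bit_b : String) (borrow_in : String) (out : String × String) : Decidable (Spec_sym_subtract_bits bit_a bit_b borrow_in out) := by unfold Spec_sym_subtract_bits; infer_instance

-- ===== CLAIM (what is proved, stated in full; the proofs are below) =====
def Claim_equal_sym_subtract_bits : Prop := ∀ (bit_a : String) (bit_b : String) (borrow_in : String), Dom_sym_subtract_bits bit_a bit_b borrow_in → Pre_sym_subtract_bits bit_a bit_b borrow_in → Spec_sym_subtract_bits bit_a bit_b borrow_in (sym_subtract_bits bit_a bit_b borrow_in)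

-- ===== LEMMAS AND PROOFS =====

-- int(x) never returns on "$"
lemma pv_ofStr_ne_dollar {x : String} {v : Int} (h : PySem.Int.ofStr? x = some v) : x ≠ "$" := by
  intro hx; rw [hx] at h
  have : PySem.Int.ofStr? "$" = none := by decide
  simp [this] at h

-- A's post-processing of one of its two sets, as a function (proof-side helper)
def pvStr (l : List Int) : String :=
  if (PySem.Set.ofList l).length = 1 then
    (if PySem.Set.contains (PySem.Set.ofList l) 1 then "1" else "0")
  else "$"

-- A's result/borrow enumerations as plain lists (proof-side helpers)
def pvR (L1 L2 L3 : List Int) : List Int :=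
  L1.flatMap fun a => L2.flatMap fun b => L3.map fun borrow =>
    if a < b + borrow then a + 2 - b - borrow else a - b - borrow
def pvB (L1 L2 L3 : List Int) : List Int :=
  L1.flatMap fun a => L2.flatMap fun b => L3.map fun borrow =>
    if a < b + borrow then (1 : Int) else 0

-- a foldl that adds f x to the first set and g x to the second = a pair of updates
lemma pv_pairFoldl (f g : Int → Int) (L : List Int) (acc : PySem.Set Int × PySem.Set Int) :
    L.foldl (fun acc x => (PySem.Set.add acc.1 (f x), PySem.Set.add acc.2 (g x))) acc
      = (PySem.Set.update acc.1 (L.map f), PySem.Set.update acc.2 (L.map g)) := by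
  induction L generalizing acc with
  | nil => simp [PySem.Set.update]
  | cons x xs ih => simp [List.foldl_cons, ih, PySem.Set.update]

-- a foldl of pairwise updates = one update by the concatenation
lemma pv_pairFoldl2 (F G : Int → List Int) (L : List Int) (acc : PySem.Set Int × PySem.Set Int) :
    L.foldl (fun acc x => (PySem.Set.update acc.1 (F x), PySem.Set.update acc.2 (G x))) acc
      = (PySem.Set.update acc.1 (L.flatMap F), PySem.Set.update acc.2 (L.flatMap G)) := by
  induction L generalizing acc with
  | nil => simp [PySem.Set.update]
  | cons x xs ih =>
    rw [List.foldl_cons]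
    show List.foldl _ (PySem.Set.update _ (F x), PySem.Set.update _ (G x)) xs = _
    rw [ih]
    simp [PySem.Set.update, List.flatMap_cons, List.foldl_append]

-- port A evaluated on explicit value lists
lemma pv_A_eval {a b c : String} {L1 L2 L3 : List Int}
    (h1 : pvToSet a = some L1) (h2 : pvToSet b = some L2) (h3 : pvToSet c = some L3) :
    sym_subtract_bits a b c = (pvStr (pvR L1 L2 L3), pvStr (pvB L1 L2 L3)) := by
  unfold sym_subtract_bits
  rw [h1, h2, h3]
  simp only [apply_ite (f := Prod.fst (α := Int) (β := Int)),
    apply_ite (f := Prod.snd (α := Int) (β := Int)), pv_pairFoldl, pv_pairFoldl2]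
  simp [pvStr, pvR, pvB, PySem.Set.ofList, PySem.Set.update, PySem.Set.empty]

-- all further elements equal the head: updating the singleton changes nothing
lemma pv_update_singleton (x : Int) : ∀ xs, (∀ y ∈ xs, y = x) → PySem.Set.update [x] xs = [x]
  | [], _ => by simp [PySem.Set.update]
  | y :: ys, h => by
    have hy := h y (by simp)
    subst hy
    have hadd : PySem.Set.add [y] y = [y] := by
      simp [PySem.Set.add, PySem.Set.contains]
    have step : PySem.Set.update [y] (y :: ys) = PySem.Set.update (PySem.Set.add [y] y) ys := rfl
    rw [step, hadd]
    exact pv_update_singleton y ys fun z hz => h z (by simp [hz])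

-- all further elements equal the head: the set is the singleton head
lemma pv_ofList_const (x : Int) (xs : List Int) (h : ∀ y ∈ xs, y = x) :
    PySem.Set.ofList (x :: xs) = [x] := by
  have base : PySem.Set.ofList (x :: xs) = PySem.Set.update [x] xs := by
    simp [PySem.Set.ofList, PySem.Set.update, PySem.Set.add, PySem.Set.empty,
      PySem.Set.contains]
  rw [base, pv_update_singleton x xs h]

-- pvStr on a nonempty list, by arithmetic on its entries only
lemma pv_setStr (x : Int) (xs : List Int) :
    pvStr (x :: xs) = if ∀ y ∈ xs, y = x then (if x = 1 then "1" else "0") else "$" := by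
  by_cases h : ∀ y ∈ xs, y = x
  · rw [if_pos h]
    unfold pvStr
    rw [pv_ofList_const x xs h]
    by_cases hx : x = 1 <;> simp [hx, PySem.Set.contains, eq_comm]
  · rw [if_neg h]
    push_neg at h
    obtain ⟨y, hy, hyx⟩ := h
    unfold pvStr
    rw [if_neg]
    intro hlen
    obtain ⟨z, hz⟩ := List.length_eq_one_iff.mp hlen
    have hxz : x ∈ PySem.Set.ofList (x :: xs) := (PySem.Set.mem_ofList _ _).mpr (by simp)
    have hyz : y ∈ PySem.Set.ofList (x :: xs) := (PySem.Set.mem_ofList _ _).mpr (by simp [hy])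
    rw [hz] at hxz hyz
    simp at hxz hyz
    exact hyx (hyz.trans hxz.symm)

-- the two fixed argument shapes
lemma pv_toSet_dollar : pvToSet "$" = some [0, 1] := by decide
lemma pv_toSet_int {x : String} {v : Int} (h : PySem.Int.ofStr? x = some v) :
    pvToSet x = some [v] := by
  simp [pvToSet, pv_ofStr_ne_dollar h, h, PySem.Set.ofList, PySem.Set.add,
    PySem.Set.empty, PySem.Set.contains]
lemma pv_bounds_dollar : pvBounds "$" = some (0, 1) := by decide
lemma pv_bounds_int {x : String} {v : Int} (h : PySem.Int.ofStr? x = some v) :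
    pvBounds x = some (v, v) := by
  simp [pvBounds, pv_ofStr_ne_dollar h, h]

lemma pv_main_ddd (a b c : String) 
    (hs1 : pvToSet a = some [0, 1]) (hb1 : pvBounds a = some (0, 1)) (hd1 : a = "$")
    (hs2 : pvToSet b = some [0, 1]) (hb2 : pvBounds b = some (0, 1)) (hd2 : b = "$")
    (hs3 : pvToSet c = some [0, 1]) (hb3 : pvBounds c = some (0, 1)) (hd3 : c = "$") :
    sym_subtract_bits a b c = sym_subtract_bits_alt a b c := by
  subst hd1; subst hd2; subst hd3; decide

set_option maxHeartbeats 1000000 in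
lemma pv_main_ddi (a b c : String) (v3 : Int) 
    (hs1 : pvToSet a = some [0, 1]) (hb1 : pvBounds a = some (0, 1)) (hd1 : a = "$")
    (hs2 : pvToSet b = some [0, 1]) (hb2 : pvBounds b = some (0, 1)) (hd2 : b = "$")
    (hs3 : pvToSet c = some [v3]) (hb3 : pvBounds c = some (v3, v3)) (hd3 : c ≠ "$") :
    sym_subtract_bits a b c = sym_subtract_bits_alt a b c := by
  rw [pv_A_eval hs1 hs2 hs3]
  simp only [pvR, pvB, List.flatMap_cons, List.flatMap_nil, List.map_cons,
    List.map_nil, List.append_nil, List.nil_append, List.cons_append]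
  rw [pv_setStr, pv_setStr]
  unfold sym_subtract_bits_alt
  rw [hb1, hb2, hb3]
  simp only [Option.bind_some, Option.map_some, Option.getD_some, hd1, hd2, hd3,
    List.forall_mem_cons]
  split_ifs <;> first | rfl | omega | (simp_all <;> omega) | simp_all

set_option maxHeartbeats 1000000 in
lemma pv_main_did (a b c : String) (v2 : Int) 
    (hs1 : pvToSet a = some [0, 1]) (hb1 : pvBounds a = some (0, 1)) (hd1 : a = "$")
    (hs2 : pvToSet b = some [v2]) (hb2 : pvBounds b = some (v2, v2)) (hd2 : b ≠ "$")
    (hs3 : pvToSet c = some [0, 1]) (hb3 : pvBounds c = some (0, 1)) (hd3 : c = "$") :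
    sym_subtract_bits a b c = sym_subtract_bits_alt a b c := by
  rw [pv_A_eval hs1 hs2 hs3]
  simp only [pvR, pvB, List.flatMap_cons, List.flatMap_nil, List.map_cons,
    List.map_nil, List.append_nil, List.nil_append, List.cons_append]
  rw [pv_setStr, pv_setStr]
  unfold sym_subtract_bits_alt
  rw [hb1, hb2, hb3]
  simp only [Option.bind_some, Option.map_some, Option.getD_some, hd1, hd2, hd3,
    List.forall_mem_cons]
  split_ifs <;> first | rfl | omega | (simp_all <;> omega) | simp_all

set_option maxHeartbeats 1000000 in
lemma pv_main_dii (a b c : String) (v2 v3 : Int) 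
    (hs1 : pvToSet a = some [0, 1]) (hb1 : pvBounds a = some (0, 1)) (hd1 : a = "$")
    (hs2 : pvToSet b = some [v2]) (hb2 : pvBounds b = some (v2, v2)) (hd2 : b ≠ "$")
    (hs3 : pvToSet c = some [v3]) (hb3 : pvBounds c = some (v3, v3)) (hd3 : c ≠ "$") :
    sym_subtract_bits a b c = sym_subtract_bits_alt a b c := by
  rw [pv_A_eval hs1 hs2 hs3]
  simp only [pvR, pvB, List.flatMap_cons, List.flatMap_nil, List.map_cons,
    List.map_nil, List.append_nil, List.nil_append, List.cons_append]
  rw [pv_setStr, pv_setStr]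
  unfold sym_subtract_bits_alt
  rw [hb1, hb2, hb3]
  simp only [Option.bind_some, Option.map_some, Option.getD_some, hd1, hd2, hd3,
    List.forall_mem_cons]
  split_ifs <;> first | rfl | omega | (simp_all <;> omega) | simp_all

set_option maxHeartbeats 1000000 in
lemma pv_main_idd (a b c : String) (v1 : Int) 
    (hs1 : pvToSet a = some [v1]) (hb1 : pvBounds a = some (v1, v1)) (hd1 : a ≠ "$")
    (hs2 : pvToSet b = some [0, 1]) (hb2 : pvBounds b = some (0, 1)) (hd2 : b = "$")
    (hs3 : pvToSet c = some [0, 1]) (hb3 : pvBounds c = some (0, 1)) (hd3 : c = "$") :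
    sym_subtract_bits a b c = sym_subtract_bits_alt a b c := by
  rw [pv_A_eval hs1 hs2 hs3]
  simp only [pvR, pvB, List.flatMap_cons, List.flatMap_nil, List.map_cons,
    List.map_nil, List.append_nil, List.nil_append, List.cons_append]
  rw [pv_setStr, pv_setStr]
  unfold sym_subtract_bits_alt
  rw [hb1, hb2, hb3]
  simp only [Option.bind_some, Option.map_some, Option.getD_some, hd1, hd2, hd3,
    List.forall_mem_cons]
  split_ifs <;> first | rfl | omega | (simp_all <;> omega) | simp_all

set_option maxHeartbeats 1000000 in
lemma pv_main_idi (a b c : String) (v1 v3 : Int) 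
    (hs1 : pvToSet a = some [v1]) (hb1 : pvBounds a = some (v1, v1)) (hd1 : a ≠ "$")
    (hs2 : pvToSet b = some [0, 1]) (hb2 : pvBounds b = some (0, 1)) (hd2 : b = "$")
    (hs3 : pvToSet c = some [v3]) (hb3 : pvBounds c = some (v3, v3)) (hd3 : c ≠ "$") :
    sym_subtract_bits a b c = sym_subtract_bits_alt a b c := by
  rw [pv_A_eval hs1 hs2 hs3]
  simp only [pvR, pvB, List.flatMap_cons, List.flatMap_nil, List.map_cons,
    List.map_nil, List.append_nil, List.nil_append, List.cons_append]
  rw [pv_setStr, pv_setStr]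
  unfold sym_subtract_bits_alt
  rw [hb1, hb2, hb3]
  simp only [Option.bind_some, Option.map_some, Option.getD_some, hd1, hd2, hd3,
    List.forall_mem_cons]
  split_ifs <;> first | rfl | omega | (simp_all <;> omega) | simp_all

set_option maxHeartbeats 1000000 in
lemma pv_main_iid (a b c : String) (v1 v2 : Int) 
    (hs1 : pvToSet a = some [v1]) (hb1 : pvBounds a = some (v1, v1)) (hd1 : a ≠ "$")
    (hs2 : pvToSet b = some [v2]) (hb2 : pvBounds b = some (v2, v2)) (hd2 : b ≠ "$")
    (hs3 : pvToSet c = some [0, 1]) (hb3 : pvBounds c = some (0, 1)) (hd3 : c = "$") :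
    sym_subtract_bits a b c = sym_subtract_bits_alt a b c := by
  rw [pv_A_eval hs1 hs2 hs3]
  simp only [pvR, pvB, List.flatMap_cons, List.flatMap_nil, List.map_cons,
    List.map_nil, List.append_nil, List.nil_append, List.cons_append]
  rw [pv_setStr, pv_setStr]
  unfold sym_subtract_bits_alt
  rw [hb1, hb2, hb3]
  simp only [Option.bind_some, Option.map_some, Option.getD_some, hd1, hd2, hd3,
    List.forall_mem_cons]
  split_ifs <;> first | rfl | omega | (simp_all <;> omega) | simp_all

set_option maxHeartbeats 1000000 in
lemma pv_main_iii (a b c : String) (v1 v2 v3 : Int) 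
    (hs1 : pvToSet a = some [v1]) (hb1 : pvBounds a = some (v1, v1)) (hd1 : a ≠ "$")
    (hs2 : pvToSet b = some [v2]) (hb2 : pvBounds b = some (v2, v2)) (hd2 : b ≠ "$")
    (hs3 : pvToSet c = some [v3]) (hb3 : pvBounds c = some (v3, v3)) (hd3 : c ≠ "$") :
    sym_subtract_bits a b c = sym_subtract_bits_alt a b c := by
  rw [pv_A_eval hs1 hs2 hs3]
  simp only [pvR, pvB, List.flatMap_cons, List.flatMap_nil, List.map_cons,
    List.map_nil, List.append_nil, List.nil_append, List.cons_append]
  rw [pv_setStr, pv_setStr]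
  unfold sym_subtract_bits_alt
  rw [hb1, hb2, hb3]
  simp only [Option.bind_some, Option.map_some, Option.getD_some, hd1, hd2, hd3,
    List.forall_mem_cons]
  split_ifs <;> first | rfl | omega | (simp_all <;> omega) | simp_all

-- ===== VERDICT (by name: the statement is the Claim_ definition above) =====
theorem sym_subtract_bits_spec : Claim_equal_sym_subtract_bits := by
  intro a b c _ hpre
  obtain ⟨ha, hb, hc⟩ := hpre
  unfold Spec_sym_subtract_bits
  have Ha : pvToSet a = some [0, 1] ∧ pvBounds a = some (0, 1) ∧ a = "$" ∨
      ∃ v, pvToSet a = some [v] ∧ pvBounds a = some (v, v) ∧ a ≠ "$" := by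
    rcases ha with ha | ha
    · exact Or.inl ⟨by rw [ha]; exact pv_toSet_dollar, by rw [ha]; exact pv_bounds_dollar, ha⟩
    · obtain ⟨v, hv⟩ := Option.isSome_iff_exists.mp ha
      exact Or.inr ⟨v, pv_toSet_int hv, pv_bounds_int hv, pv_ofStr_ne_dollar hv⟩
  have Hb : pvToSet b = some [0, 1] ∧ pvBounds b = some (0, 1) ∧ b = "$" ∨
      ∃ v, pvToSet b = some [v] ∧ pvBounds b = some (v, v) ∧ b ≠ "$" := by
    rcases hb with hb | hb
    · exact Or.inl ⟨by rw [hb]; exact pv_toSet_dollar, by rw [hb]; exact pv_bounds_dollar, hb⟩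
    · obtain ⟨v, hv⟩ := Option.isSome_iff_exists.mp hb
      exact Or.inr ⟨v, pv_toSet_int hv, pv_bounds_int hv, pv_ofStr_ne_dollar hv⟩
  have Hc : pvToSet c = some [0, 1] ∧ pvBounds c = some (0, 1) ∧ c = "$" ∨
      ∃ v, pvToSet c = some [v] ∧ pvBounds c = some (v, v) ∧ c ≠ "$" := by
    rcases hc with hc | hc
    · exact Or.inl ⟨by rw [hc]; exact pv_toSet_dollar, by rw [hc]; exact pv_bounds_dollar, hc⟩
    · obtain ⟨v, hv⟩ := Option.isSome_iff_exists.mp hc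
      exact Or.inr ⟨v, pv_toSet_int hv, pv_bounds_int hv, pv_ofStr_ne_dollar hv⟩
  rcases Ha with ⟨hs1, hb1, hd1⟩ | ⟨v1, hs1, hb1, hd1⟩ <;>
    rcases Hb with ⟨hs2, hb2, hd2⟩ | ⟨v2, hs2, hb2, hd2⟩ <;>
      rcases Hc with ⟨hs3, hb3, hd3⟩ | ⟨v3, hs3, hb3, hd3⟩
  · exact pv_main_ddd a b c hs1 hb1 hd1 hs2 hb2 hd2 hs3 hb3 hd3
  · exact pv_main_ddi a b c v3 hs1 hb1 hd1 hs2 hb2 hd2 hs3 hb3 hd3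
  · exact pv_main_did a b c v2 hs1 hb1 hd1 hs2 hb2 hd2 hs3 hb3 hd3
  · exact pv_main_dii a b c v2 v3 hs1 hb1 hd1 hs2 hb2 hd2 hs3 hb3 hd3
  · exact pv_main_idd a b c v1 hs1 hb1 hd1 hs2 hb2 hd2 hs3 hb3 hd3
  · exact pv_main_idi a b c v1 v3 hs1 hb1 hd1 hs2 hb2 hd2 hs3 hb3 hd3
  · exact pv_main_iid a b c v1 v2 hs1 hb1 hd1 hs2 hb2 hd2 hs3 hb3 hd3
  · exact pv_main_iii a b c v1 v2 v3 hs1 hb1 hd1 hs2 hb2 hd2 hs3 hb3 hd3
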